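-- pv_equiv track=rewrite | github.com/Nghia03092004/nghia03092004.github.io | project_euler/problem_482/solution.py | solve
-- ===== SOURCE A (Python) =====
-- import math
--
-- def is_perfect_square(n):
--     if n < 0:
--         return False, 0
--     s = int(math.isqrt(n))
--     if s * s == n:
--         return True, s
--     return False, 0
--
-- def solve(P):
--     total = 0
--     max_s = P // 2
--
--     for x in range(1, max_s + 1):
--         if 3 * x > max_s:
--             # Even with y=x, z=x, s=3x must be <= max_s
--             pass
--         for y in range(x, max_s - x + 1):
--             z_max = max_s - x - y
--             if z_max < y:
--                 break
--             for z in range(y, z_max + 1):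
--                 s = x + y + z
--
--                 # |IA|^2 = x*(x+y)*(x+z)/s
--                 numA = x * (x + y) * (x + z)
--                 if numA % s != 0:
--                     continue
--                 IA2 = numA // s
--                 okA, IA = is_perfect_square(IA2)
--                 if not okA:
--                     continue
--
--                 # |IB|^2 = y*(x+z)*(y+z)/s
--                 numB = y * (x + z) * (y + z)
--                 if numB % s != 0:
--                     continue
--                 IB2 = numB // s
--                 okB, IB = is_perfect_square(IB2)
--                 if not okB:
--                     continue
--
--                 # |IC|^2 = z*(x+y)*(y+z)/s
--                 numC = z * (x + y) * (y + z)
--                 if numC % s != 0: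
--                     continue
--                 IC2 = numC // s
--                 okC, IC = is_perfect_square(IC2)
--                 if not okC:
--                     continue
--
--                 p = 2 * s
--                 L = p + IA + IB + IC
--
--                 # Count permutations of (x, y, z)
--                 if x == y == z:
--                     perms = 1
--                 elif x == y or y == z:
--                     perms = 3
--                 else:
--                     perms = 6
--
--                 total += L * perms
--
--     return total
-- ===== SOURCE B (Python) =====
-- from math import isqrt
--
--
-- def square_root_exact(q):
--     r = isqrt(q)
--     return r if r * r == q else None
--
--
-- def extend(prefix, lo, budget):
--     # Fill the remaining slots of a nondecreasing triple recursively; the last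
--     # slot is scored in place.  Divisibility is tested on the small products
--     # x*y*z, x*y*y, x*z*z via the exact identities
--     #   x*(x+y)*(x+z) = x*y*z + s*x*x
--     #   y*(x+z)*(y+z) = x*y*y + s*y*z
--     #   z*(x+y)*(y+z) = x*z*z + s*y*z
--     # and the multiplicity is read off the comparison count (x < y) + (y < z).
--     if len(prefix) == 2:
--         x, y = prefix
--         total = 0
--         for z in range(lo, budget + 1):
--             s = x + y + z
--             if x * y * z % s or x * y * y % s or x * z * z % s:
--                 continue
--             ia = square_root_exact(x * (x + y) * (x + z) // s)
--             if ia is None: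
--                 continue
--             ib = square_root_exact(y * (x + z) * (y + z) // s)
--             if ib is None:
--                 continue
--             ic = square_root_exact(z * (x + y) * (y + z) // s)
--             if ic is None:
--                 continue
--             total += (2 * s + ia + ib + ic) * (1, 3, 6)[(x < y) + (y < z)]
--         return total
--     return sum(extend(prefix + [v], v, budget - v)
--                for v in range(lo, budget // (3 - len(prefix)) + 1))
--
--
-- def solve(P):
--     return extend([], 1, P // 2)
-- ===== Notes on version B (the rewrite author's own statement) =====
-- stated objective: alternative
-- what changed: B replaces the three nested loops with break logic by a recursive prefix-extension over nondecreasing triples with a shrinking budget (the last slot scored in place), tests divisibility on the small products x*y*z, x*y*y, x*z*z via the exact identities numA = xyz + s*x^2, numB = xy^2 + s*yz, numC = xz^2 + s*yz (one short-circuit precheck before any isqrt), and reads the multiplicity off the comparison count (x<y)+(y<z) instead of an equality chain.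
import Mathlib
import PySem

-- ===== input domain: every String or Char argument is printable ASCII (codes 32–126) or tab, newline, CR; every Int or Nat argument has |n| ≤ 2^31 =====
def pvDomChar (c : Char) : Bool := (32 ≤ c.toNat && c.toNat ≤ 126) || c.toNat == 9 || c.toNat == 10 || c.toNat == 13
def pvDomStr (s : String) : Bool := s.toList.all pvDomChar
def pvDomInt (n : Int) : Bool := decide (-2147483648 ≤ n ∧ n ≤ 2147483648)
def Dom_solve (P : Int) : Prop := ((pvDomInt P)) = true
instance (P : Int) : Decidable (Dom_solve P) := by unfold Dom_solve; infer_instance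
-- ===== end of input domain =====

-- B replaces the nested loops (with break) by a recursive prefix extension over
-- nondecreasing triples, checks divisibility on the small products x*y*z, x*y*y,
-- x*z*z via exact algebraic identities, and reads the multiplicity off the
-- cardinality of {x,y,z}; objective: alternative decomposition, same cost.

-- ===== PORT A =====

-- is_perfect_square(n); math.isqrt on the nonnegative branch is Nat.sqrt (exact)
def isPerfectSquare (n : Int) : Bool × Int :=
  if n < 0 then (false, 0)
  else
    let s : Int := (Int.toNat n).sqrt
    if s * s = n then (true, s) else (false, 0)

-- body of A's innermost loop; each `continue` contributes 0 to the running total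
def contribA (x y z : Int) : Int :=
  let s := x + y + z
  let numA := x * (x + y) * (x + z)
  if PySem.Int.mod numA s ≠ 0 then 0 else
  let IA2 := PySem.Int.floordiv numA s
  let rA := isPerfectSquare IA2
  if !rA.1 then 0 else
  let numB := y * (x + z) * (y + z)
  if PySem.Int.mod numB s ≠ 0 then 0 else
  let IB2 := PySem.Int.floordiv numB s
  let rB := isPerfectSquare IB2
  if !rB.1 then 0 else
  let numC := z * (x + y) * (y + z)
  if PySem.Int.mod numC s ≠ 0 then 0 else
  let IC2 := PySem.Int.floordiv numC s
  let rC := isPerfectSquare IC2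
  if !rC.1 then 0 else
  let p := 2 * s
  let L := p + rA.2 + rB.2 + rC.2
  let perms : Int := if x = y ∧ y = z then 1 else if x = y ∨ y = z then 3 else 6
  L * perms

-- 'for z in range(y, z_max + 1)'
def loopZA (x y : Int) (zs : List Int) (t : Int) : Int :=
  zs.foldl (fun t z => t + contribA x y z) t

-- 'for y in range(x, max_s - x + 1)' with the 'if z_max < y: break'
def loopYA (maxS x : Int) : List Int → Int → Int
  | [], t => t
  | y :: rest, t =>
      let zmax := maxS - x - y
      if zmax < y then t
      else loopYA maxS x rest (loopZA x y (PySem.List.pyRange y (zmax + 1)) t)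

def solve (P : Int) : Int :=
  let maxS := PySem.Int.floordiv P 2
  -- A's 'if 3 * x > max_s: pass' executes no statement and is omitted
  (PySem.List.pyRange 1 (maxS + 1)).foldl
    (fun t x => loopYA maxS x (PySem.List.pyRange x (maxS - x + 1)) t) 0

-- ===== PORT B =====

-- square_root_exact(q); math.isqrt on the nonnegative values reached is Nat.sqrt (exact)
def squareRootExact (q : Int) : Option Int :=
  let r : Int := (Int.toNat q).sqrt
  if r * r = q then some r else none

-- the body of the z loop of extend's base case ('continue' contributes 0);
-- the (1, 3, 6)[(x < y) + (y < z)] index is always in range, so the pyGet?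
-- lookup is always `some` and the getD default is never used
def bodyB (x y z : Int) : Int :=
  let s := x + y + z
  if PySem.Int.mod (x * y * z) s ≠ 0 ∨ PySem.Int.mod (x * y * y) s ≠ 0 ∨
      PySem.Int.mod (x * z * z) s ≠ 0 then 0
  else
    match squareRootExact (PySem.Int.floordiv (x * (x + y) * (x + z)) s) with
    | none => 0
    | some ia =>
      match squareRootExact (PySem.Int.floordiv (y * (x + z) * (y + z)) s) with
      | none => 0
      | some ib =>
        match squareRootExact (PySem.Int.floordiv (z * (x + y) * (y + z)) s) with
        | none => 0
        | some ic =>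
          (2 * s + ia + ib + ic) *
            (PySem.List.pyGet? ([1, 3, 6] : List Int)
              ((if x < y then (1 : Int) else 0) + (if y < z then 1 else 0))).getD 0

-- extend(prefix, lo, budget); recursion on the number of free slots
-- (the final 0 branch is a totality guard: prefixes longer than 2 never occur)
def extendB (pre : List Int) (lo budget : Int) : Int :=
  if pre.length = 2 then
    match pre with
    | [x, y] =>
        (PySem.List.pyRange lo (budget + 1)).foldl (fun t z => t + bodyB x y z) 0
    | _ => 0
  else if h : pre.length < 2 then
    ((PySem.List.pyRange lo
        (PySem.Int.floordiv budget (3 - (pre.length : Int)) + 1)).map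
      (fun v => extendB (pre ++ [v]) v (budget - v))).sum
  else 0
  termination_by 2 - pre.length
  decreasing_by simp; omega

def solve_alt (P : Int) : Int := extendB [] 1 (PySem.Int.floordiv P 2)

-- ===== PRECONDITION & SPEC =====
def Spec_solve (P : Int) (out : Int) : Prop := out = solve_alt P
instance (P : Int) (out : Int) : Decidable (Spec_solve P out) := by unfold Spec_solve; infer_instance

-- ===== CLAIM (what is proved, stated in full; the proofs are below) =====
def Claim_equal_solve : Prop := ∀ (P : Int), Dom_solve P → Spec_solve P (solve P)

-- ===== LEMMAS AND PROOFS =====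

-- sum of a mapped ascending range as a Finset sum
theorem sum_map_pyRange (g : Int → Int) (a b : Int) :
    ((PySem.List.pyRange a b).map g).sum = ∑ i ∈ Finset.Icc a (b - 1), g i := by
  by_cases h : b ≤ a
  · simp [PySem.List.pyRange_one_eq_nil h, Finset.Icc_eq_empty (by omega : ¬ a ≤ b - 1)]
  · have h' : a < b := by omega
    rw [PySem.List.pyRange_one_cons h', List.map_cons, List.sum_cons,
        sum_map_pyRange g (a + 1) b,
        show Finset.Icc a (b - 1) = insert a (Finset.Icc (a + 1) (b - 1)) by
          ext i; simp only [Finset.mem_Icc, Finset.mem_insert]; omega,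
        Finset.sum_insert (by simp only [Finset.mem_Icc]; omega)]
  termination_by (b - a).toNat
  decreasing_by omega

-- fold-with-+ over a range as a Finset sum
theorem foldl_add_pyRange (g : Int → Int) (a b t : Int) :
    (PySem.List.pyRange a b).foldl (fun t i => t + g i) t
      = t + ∑ i ∈ Finset.Icc a (b - 1), g i := by
  rw [PySem.List.foldl_add, sum_map_pyRange]

-- the z loop
theorem loopZA_eq (x y zmax t : Int) :
    loopZA x y (PySem.List.pyRange y (zmax + 1)) t
      = t + ∑ z ∈ Finset.Icc y zmax, contribA x y z := by
  unfold loopZA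
  simpa using foldl_add_pyRange (contribA x y) y (zmax + 1) t

-- the y loop with its break: once z_max < y holds, it holds for every later y as well,
-- so the skipped iterations would all have contributed an empty z range
theorem loopYA_eq_aux (maxS x : Int) (l : List Int) (hl : l.Pairwise (· ≤ ·)) (t : Int) :
    loopYA maxS x l t
      = t + (l.map (fun y => ∑ z ∈ Finset.Icc y (maxS - x - y), contribA x y z)).sum := by
  induction l generalizing t with
  | nil => simp [loopYA]
  | cons y rest ih =>
    obtain ⟨hy, hrest⟩ := List.pairwise_cons.mp hl
    rw [loopYA]
    by_cases h : maxS - x - y < y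
    · simp only [if_pos h]
      have hz : ∀ y' ∈ y :: rest,
          (fun y => ∑ z ∈ Finset.Icc y (maxS - x - y), contribA x y z) y' = 0 := by
        intro y' hy'
        have : y ≤ y' := by
          rcases List.mem_cons.mp hy' with h1 | h1
          · omega
          · exact hy y' h1
        simp only
        rw [Finset.Icc_eq_empty (by omega), Finset.sum_empty]
      rw [List.sum_eq_zero (by intro a ha; rcases List.mem_map.mp ha with ⟨y', hy', rfl⟩; exact hz y' hy')]
      ring
    · simp only [if_neg h]
      rw [ih hrest, loopZA_eq, List.map_cons, List.sum_cons]
      ring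

theorem loopYA_eq (maxS x t : Int) :
    loopYA maxS x (PySem.List.pyRange x (maxS - x + 1)) t
      = t + ∑ y ∈ Finset.Icc x (maxS - x),
              ∑ z ∈ Finset.Icc y (maxS - x - y), contribA x y z := by
  rw [loopYA_eq_aux maxS x _
        ((PySem.List.pairwise_lt_pyRange_one x (maxS - x + 1)).imp fun h => le_of_lt h),
      sum_map_pyRange]
  norm_num

-- A as a nested Finset sum over sorted triples
theorem solve_eq (P : Int) :
    solve P = ∑ x ∈ Finset.Icc 1 (PySem.Int.floordiv P 2),
                ∑ y ∈ Finset.Icc x (PySem.Int.floordiv P 2 - x),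
                  ∑ z ∈ Finset.Icc y (PySem.Int.floordiv P 2 - x - y),
                    contribA x y z := by
  unfold solve
  simp only [loopYA_eq, foldl_add_pyRange, add_sub_cancel_right, zero_add]

-- unfolding B's recursion level by level
theorem extendB_two (x y lo b : Int) :
    extendB [x, y] lo b = ∑ z ∈ Finset.Icc lo b, bodyB x y z := by
  rw [extendB]
  norm_num
  rw [foldl_add_pyRange]
  simp

theorem extendB_one (x lo b : Int) :
    extendB [x] lo b
      = ∑ y ∈ Finset.Icc lo (b / 2), ∑ z ∈ Finset.Icc y (b - y), bodyB x y z := by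
  rw [extendB]
  simp only [List.length_cons, List.length_nil]
  norm_num
  rw [sum_map_pyRange]
  simp only [extendB_two, add_sub_cancel_right]
  all_goals (intro _ _ h; simp at h)

theorem extendB_zero (m : Int) :
    extendB [] 1 m
      = ∑ x ∈ Finset.Icc 1 (m / 3), ∑ y ∈ Finset.Icc x ((m - x) / 2),
          ∑ z ∈ Finset.Icc y (m - x - y), bodyB x y z := by
  rw [extendB]
  simp only [List.length_nil]
  norm_num
  rw [sum_map_pyRange]
  simp only [extendB_one, add_sub_cancel_right, sub_sub]
  all_goals (intro _ _ h; simp at h)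

theorem solve_alt_eq (P : Int) :
    solve_alt P = ∑ x ∈ Finset.Icc 1 (PySem.Int.floordiv P 2 / 3),
                    ∑ y ∈ Finset.Icc x ((PySem.Int.floordiv P 2 - x) / 2),
                      ∑ z ∈ Finset.Icc y (PySem.Int.floordiv P 2 - x - y), bodyB x y z := by
  unfold solve_alt
  rw [extendB_zero]

-- A's wider x / y ranges only add terms whose inner z interval is empty
theorem widen (m : Int) (f : Int → Int → Int → Int) :
    (∑ x ∈ Finset.Icc 1 m, ∑ y ∈ Finset.Icc x (m - x),
        ∑ z ∈ Finset.Icc y (m - x - y), f x y z)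
      = ∑ x ∈ Finset.Icc 1 (m / 3), ∑ y ∈ Finset.Icc x ((m - x) / 2),
          ∑ z ∈ Finset.Icc y (m - x - y), f x y z := by
  by_cases hm : 1 ≤ m
  case neg =>
    rw [Finset.Icc_eq_empty (by omega : ¬ (1:Int) ≤ m),
        Finset.Icc_eq_empty (by omega : ¬ (1:Int) ≤ m / 3),
        Finset.sum_empty, Finset.sum_empty]
  rw [← Finset.sum_subset (Finset.Icc_subset_Icc le_rfl (by omega : m / 3 ≤ m))]
  · refine Finset.sum_congr rfl fun x hx => ?_
    simp only [Finset.mem_Icc] at hx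
    rw [← Finset.sum_subset
        (Finset.Icc_subset_Icc le_rfl (by omega : (m - x) / 2 ≤ m - x))]
    intro y hy hy'
    simp only [Finset.mem_Icc] at hy hy'
    rw [Finset.Icc_eq_empty (by omega), Finset.sum_empty]
  · intro x hx hx'
    simp only [Finset.mem_Icc] at hx hx'
    refine Finset.sum_eq_zero fun y hy => ?_
    simp only [Finset.mem_Icc] at hy
    rw [Finset.Icc_eq_empty (by omega), Finset.sum_empty]

-- B's square-root helper in terms of A's (negative arguments fail both tests)
theorem sre_spec (q : Int) :
    squareRootExact q
      = if (isPerfectSquare q).1 then some (isPerfectSquare q).2 else none := by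
  unfold squareRootExact isPerfectSquare
  by_cases hq : q < 0
  · have h0 : q.toNat = 0 := Int.toNat_of_nonpos hq.le
    simp [hq, h0]
    omega
  · simp only [hq, if_false]
    split_ifs <;> simp_all

-- the comparison-count multiplicity agrees with A's equality chain on sorted triples
theorem mult_eq (x y z : Int) (hxy : x ≤ y) (hyz : y ≤ z) :
    (PySem.List.pyGet? ([1, 3, 6] : List Int)
        ((if x < y then (1 : Int) else 0) + (if y < z then 1 else 0))).getD 0
      = if x = y ∧ y = z then 1 else if x = y ∨ y = z then 3 else 6 := by
  by_cases h1 : x = y <;> by_cases h2 : y = z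
  · simp [PySem.List.pyGet?, PySem.List.pyIdx?, show ¬ x < y by omega,
      show ¬ y < z by omega, show x = y ∧ y = z from ⟨h1, h2⟩]
  · simp [PySem.List.pyGet?, PySem.List.pyIdx?, show ¬ x < y by omega,
      show y < z by omega, show ¬ (x = y ∧ y = z) from fun h => h2 h.2,
      show x = y ∨ y = z from Or.inl h1]
  · simp [PySem.List.pyGet?, PySem.List.pyIdx?, show x < y by omega,
      show ¬ y < z by omega, show ¬ (x = y ∧ y = z) from fun h => h1 h.1,
      show x = y ∨ y = z from Or.inr h2]
  · simp [PySem.List.pyGet?, PySem.List.pyIdx?, show x < y by omega,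
      show y < z by omega, show ¬ (x = y ∧ y = z) from fun h => h1 h.1,
      show ¬ (x = y ∨ y = z) from fun h => h.elim h1 h2]

-- mod over a shift by a multiple of a positive modulus
theorem mod_shift (a k s : Int) (hs : 0 < s) :
    PySem.Int.mod (a + s * k) s = PySem.Int.mod a s := by
  rw [PySem.Int.mod_eq_emod_of_pos hs, PySem.Int.mod_eq_emod_of_pos hs,
    Int.add_mul_emod_self_left]

-- the two loop bodies agree on sorted triples:
--   x(x+y)(x+z) = xyz + s·x², y(x+z)(y+z) = xy² + s·yz, z(x+y)(y+z) = xz² + s·yz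
theorem bodyB_eq_contribA (x y z : Int) (hx : 1 ≤ x) (hxy : x ≤ y) (hyz : y ≤ z) :
    bodyB x y z = contribA x y z := by
  have hs : 0 < x + y + z := by omega
  have eA : x * (x + y) * (x + z) = x * y * z + (x + y + z) * (x * x) := by ring
  have eB : y * (x + z) * (y + z) = x * y * y + (x + y + z) * (y * z) := by ring
  have eC : z * (x + y) * (y + z) = x * z * z + (x + y + z) * (y * z) := by ring
  have mA : PySem.Int.mod (x * (x + y) * (x + z)) (x + y + z)
      = PySem.Int.mod (x * y * z) (x + y + z) := by rw [eA, mod_shift _ _ _ hs]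
  have mB : PySem.Int.mod (y * (x + z) * (y + z)) (x + y + z)
      = PySem.Int.mod (x * y * y) (x + y + z) := by rw [eB, mod_shift _ _ _ hs]
  have mC : PySem.Int.mod (z * (x + y) * (y + z)) (x + y + z)
      = PySem.Int.mod (x * z * z) (x + y + z) := by rw [eC, mod_shift _ _ _ hs]
  unfold bodyB contribA
  simp only [sre_spec, ← mA, ← mB, ← mC]
  by_cases hA : PySem.Int.mod (x * (x + y) * (x + z)) (x + y + z) = 0
  · simp only [hA, not_true_eq_false, false_or, ne_eq, if_false]
    cases hsA : (isPerfectSquare (PySem.Int.floordiv (x * (x + y) * (x + z)) (x + y + z))).1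
    · by_cases hB : PySem.Int.mod (y * (x + z) * (y + z)) (x + y + z) = 0 <;>
        simp [hB, hsA]
    · simp only [hsA, Bool.not_true, if_true, Bool.false_eq_true, if_false]
      by_cases hB : PySem.Int.mod (y * (x + z) * (y + z)) (x + y + z) = 0
      · simp only [hB, not_true_eq_false, false_or, ne_eq, if_false]
        cases hsB : (isPerfectSquare (PySem.Int.floordiv (y * (x + z) * (y + z)) (x + y + z))).1
        · by_cases hC : PySem.Int.mod (z * (x + y) * (y + z)) (x + y + z) = 0 <;>
            simp [hC, hsB]
        · simp only [hsB, Bool.not_true, if_true, Bool.false_eq_true, if_false]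
          by_cases hC : PySem.Int.mod (z * (x + y) * (y + z)) (x + y + z) = 0
          · simp only [hC, not_true_eq_false, ne_eq, if_false]
            cases hsC : (isPerfectSquare (PySem.Int.floordiv (z * (x + y) * (y + z)) (x + y + z))).1
            · simp [hsC]
            · simp only [hsC, Bool.not_true, if_true, Bool.false_eq_true, if_false]
              rw [mult_eq x y z hxy hyz]
              try ring
          · simp [hC]
      · simp [hB]
  · simp [hA]

-- ===== VERDICT (by name: the statement is the Claim_ definition above) =====
theorem solve_spec : Claim_equal_solve := by
  intro P _
  unfold Spec_solve
  rw [solve_eq, solve_alt_eq, widen]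
  refine Finset.sum_congr rfl fun x hx => Finset.sum_congr rfl fun y hy =>
    Finset.sum_congr rfl fun z hz => ?_
  simp only [Finset.mem_Icc] at hx hy hz
  exact (bodyB_eq_contribA x y z hx.1 hy.1 hz.1).symm
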